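-- pv_equiv track=rewrite | github.com/DennieCodes/python-exploration | python-functions/breakout_room.py | breakout_room
-- ===== SOURCE A (Python) =====
-- def breakout_room(code, message):
--     count = 0
--     flag = True
--     inf_check = 0
--     substring = message
--     last_letter = code[len(code)-1]
--
--     while flag == True and inf_check < 100:
--         for letter in code:
--             if not letter in substring: # When we no longer find code in the substring then end loop
--                 flag = False
--                 break
--
--             new_substring_position = substring.find(letter) # Find next letter from code in substring
--             substring = substring[new_substring_position+1:]
--
--             if letter == last_letter: # When we have found the last letter then entire code has been found so add count
--                 count += 1
--
--         inf_check += 1 # Infinite loop stop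
--
--     return count
-- ===== SOURCE B (Python) =====
-- def breakout_room(code, message):
--     # Single left-to-right scan of message with an index pointer into code.
--     # Matches A's counting rule: count increments each time the matched code
--     # letter equals code's last letter; at most 100 full passes through code.
--     last = code[-1]
--     n = len(code)
--     count = 0
--     j = 0
--     passes = 0
--     for ch in message:
--         if passes == 100:
--             break
--         if ch == code[j]:
--             if code[j] == last:
--                 count += 1
--             j += 1
--             if j == n:
--                 j = 0
--                 passes += 1
--     return count
-- ===== Notes on version B (the rewrite author's own statement) =====
-- stated objective: faster
-- what changed: A repeatedly rescans the remaining message with 'in'/find and rebuilds it by slicing inside up to 100 passes; B makes one left-to-right scan of the message with an index pointer into code, counting matches of code's last letter and completed passes.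
-- outside the precondition, e.g. on breakout_room('', 'abc'): A raises IndexError, B raises IndexError
import Mathlib
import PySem

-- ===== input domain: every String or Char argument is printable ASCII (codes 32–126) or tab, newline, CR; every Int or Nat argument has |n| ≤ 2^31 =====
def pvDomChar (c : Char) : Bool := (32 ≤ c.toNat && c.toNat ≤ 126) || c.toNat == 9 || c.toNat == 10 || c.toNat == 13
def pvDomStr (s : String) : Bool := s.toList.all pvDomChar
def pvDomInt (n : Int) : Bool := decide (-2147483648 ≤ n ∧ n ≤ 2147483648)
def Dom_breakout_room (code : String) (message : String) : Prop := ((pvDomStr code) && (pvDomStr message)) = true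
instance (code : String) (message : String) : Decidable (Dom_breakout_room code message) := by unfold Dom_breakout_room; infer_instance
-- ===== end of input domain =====

-- B replaces A's repeated find/slice passes by a single left-to-right scan of message
-- with an index pointer into code (objective: faster; measured).

-- ===== PORT A =====
-- inner 'for letter in code' loop: state (count, substring), returns (count, substring, flag)
def pvForA (last : Char) : List Char → Int → List Char → Int × List Char × Bool
  | [], count, sub => (count, sub, true)
  | c :: cs, count, sub =>
      if PySem.Chars.isIn [c] sub = false then (count, sub, false)
      else
        let pos := PySem.Chars.find sub [c]
        let sub' := PySem.List.slice sub (some (pos + 1)) none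
        pvForA last cs (if c == last then count + 1 else count) sub'

-- 'while flag == True and inf_check < 100': fuel = 100 - inf_check
def pvWhileA (codeL : List Char) (last : Char) : Nat → Int → List Char → Int
  | 0, count, _ => count
  | fuel + 1, count, sub =>
      match pvForA last codeL count sub with
      | (count', sub', true) => pvWhileA codeL last fuel count' sub'
      | (count', _, false) => count'

def breakout_room (code : String) (message : String) : Int :=
  match PySem.Str.pyGet? code ((PySem.Str.len code : Int) - 1) with
  | none => 0   -- Python raises IndexError here (empty code); excluded by Pre_
  | some last => pvWhileA code.toList last 100 0 message.toList

-- ===== PORT B =====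
-- single scan of message; j is the index into code of the next letter to match
-- (code[j] is total here via getD: in Source B j stays < len(code), so the default is never read)
def pvLoopB (codeL : List Char) (last : Char) : List Char → Int → Nat → Nat → Int
  | [], count, _, _ => count
  | ch :: ms, count, j, passes =>
      if passes == 100 then count
      else
        if ch == codeL.getD j ' ' then
          let count' := if codeL.getD j ' ' == last then count + 1 else count
          if j + 1 == codeL.length then pvLoopB codeL last ms count' 0 (passes + 1)
          else pvLoopB codeL last ms count' (j + 1) passes
        else pvLoopB codeL last ms count j passes

def breakout_room_alt (code : String) (message : String) : Int :=
  match PySem.Str.pyGet? code (-1) with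
  | none => 0   -- Python raises IndexError here (empty code); excluded by Pre_
  | some last => pvLoopB code.toList last message.toList 0 0 0

-- ===== PRECONDITION & SPEC =====
-- Pre_ excludes only code = "", on which A raises IndexError (code[len(code)-1]).
def Pre_breakout_room (code : String) (message : String) : Prop := code ≠ ""
instance (code : String) (message : String) : Decidable (Pre_breakout_room code message) := by
  unfold Pre_breakout_room; infer_instance

def pvWitness_breakout_room : String × String := ("ab", "xaybabz")

def Spec_breakout_room (code : String) (message : String) (out : Int) : Prop := out = breakout_room_alt code message
instance (code : String) (message : String) (out : Int) : Decidable (Spec_breakout_room code message out) := by unfold Spec_breakout_room; infer_instance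

-- ===== CLAIM (what is proved, stated in full; the proofs are below) =====
def Claim_equal_breakout_room : Prop := ∀ (code : String) (message : String), Dom_breakout_room code message → Pre_breakout_room code message → Spec_breakout_room code message (breakout_room code message)

-- ===== LEMMAS AND PROOFS =====

-- proof-side middle form: scan of s with pointer into cs, one pass of code
def pvScan (last : Char) : List Char → List Char → Int → Int × List Char × Bool
  | [], s, count => (count, s, true)
  | _ :: _, [], count => (count, [], false)
  | c :: cs, x :: s, count =>
      if c == x then pvScan last cs s (if c == last then count + 1 else count)
      else pvScan last (c :: cs) s count
termination_by _ s _ => s.length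

-- chains of passes driven by pvScan
def pvChainF (codeL : List Char) (last : Char) : Nat → Int → List Char → Int
  | 0, count, _ => count
  | fuel + 1, count, s =>
      match pvScan last codeL s count with
      | (count', s', true) => pvChainF codeL last fuel count' s'
      | (count', _, false) => count'

def pvChainG (codeL : List Char) (last : Char) : Nat → Int → List Char → List Char → Int
  | 0, count, _, _ => count
  | fuel + 1, count, rest, s =>
      match pvScan last rest s count with
      | (count', s', true) => pvChainF codeL last fuel count' s'
      | (count', _, false) => count'

-- results agree in count and flag; substrings agree when the pass succeeded
def pvOutEq (a b : Int × List Char × Bool) : Prop :=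
  a.1 = b.1 ∧ a.2.2 = b.2.2 ∧ (a.2.2 = true → a.2.1 = b.2.1)

lemma pvOutEq_refl (a : Int × List Char × Bool) : pvOutEq a a := ⟨rfl, rfl, fun _ => rfl⟩

lemma pvOutEq_trans {a b c : Int × List Char × Bool} (h1 : pvOutEq a b) (h2 : pvOutEq b c) :
    pvOutEq a c := by
  obtain ⟨e1, e2, e3⟩ := h1; obtain ⟨f1, f2, f3⟩ := h2
  exact ⟨e1.trans f1, e2.trans f2, fun h => (e3 h).trans (f3 (e2 ▸ h))⟩

-- single-character facts about Python's 'in' and '.find'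
lemma pv_isIn_nil (c : Char) : PySem.Chars.isIn [c] [] = false := by
  rw [PySem.Chars.isIn_eq_false_iff]; simp

lemma pv_isIn_cons_ne (c x : Char) (s : List Char) (h : ¬ c = x) :
    PySem.Chars.isIn [c] (x :: s) = PySem.Chars.isIn [c] s := by
  cases hin : PySem.Chars.isIn [c] s with
  | true =>
      rw [PySem.Chars.isIn_iff_infix] at hin ⊢
      exact List.infix_cons hin
  | false =>
      rw [PySem.Chars.isIn_eq_false_iff] at hin ⊢
      intro hinf
      rcases List.infix_cons_iff.mp hinf with hpre | hinf'
      · rcases List.cons_prefix_cons.mp hpre with ⟨hcx, -⟩; exact h hcx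
      · exact hin hinf'

lemma pv_isIn_cons_self (c : Char) (s : List Char) :
    PySem.Chars.isIn [c] (c :: s) = true := by
  rw [PySem.Chars.isIn_iff_infix]
  have hp : [c] <+: c :: s := ⟨s, rfl⟩
  exact hp.isInfix

lemma pv_find_cons_self (c : Char) (s : List Char) :
    PySem.Chars.find (c :: s) [c] = 0 := by
  have hp : [c] <+: c :: s := ⟨s, rfl⟩
  have hinf : [c] <:+: (c :: s) := hp.isInfix
  have h0 : 0 ≤ PySem.Chars.find (c :: s) [c] := (PySem.Chars.find_nonneg_iff _ _).mpr hinf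
  obtain ⟨hpre, hmin⟩ := PySem.Chars.find_spec h0
  by_contra hne
  have hpos : 0 < (PySem.Chars.find (c :: s) [c]).toNat := by omega
  exact hmin 0 hpos (by exact ⟨s, rfl⟩)

lemma pv_find_cons_ne (c x : Char) (s : List Char) (h : ¬ c = x)
    (hin : PySem.Chars.isIn [c] s = true) :
    PySem.Chars.find (x :: s) [c] = PySem.Chars.find s [c] + 1 := by
  have hk : 0 ≤ PySem.Chars.find s [c] :=
    (PySem.Chars.find_nonneg_iff _ _).mpr ((PySem.Chars.isIn_iff_infix _ _).mp hin)
  obtain ⟨hkpre, hkmin⟩ := PySem.Chars.find_spec hk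
  have hin' : PySem.Chars.isIn [c] (x :: s) = true := by rw [pv_isIn_cons_ne c x s h]; exact hin
  have hf : 0 ≤ PySem.Chars.find (x :: s) [c] :=
    (PySem.Chars.find_nonneg_iff _ _).mpr ((PySem.Chars.isIn_iff_infix _ _).mp hin')
  obtain ⟨hfpre, hfmin⟩ := PySem.Chars.find_spec hf
  set f := PySem.Chars.find (x :: s) [c] with hfdef
  set k := PySem.Chars.find s [c] with hkdef
  have hfne0 : f.toNat ≠ 0 := by
    intro h0
    rw [h0] at hfpre
    exact h (by simpa using hfpre)
  obtain ⟨m, hm⟩ : ∃ m, f.toNat = m + 1 := ⟨f.toNat - 1, by omega⟩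
  have hdrop : [c] <+: s.drop m := by
    have := hfpre; rw [hm] at this; simpa using this
  have h1 : k.toNat ≤ m := by
    by_contra hlt
    exact hkmin m (by omega) hdrop
  have h2 : f.toNat ≤ k.toNat + 1 := by
    by_contra hlt
    exact hfmin (k.toNat + 1) (by omega) (by simpa using hkpre)
  omega

-- dropping a non-matching head of the substring does not change A's inner pass (up to pvOutEq)
lemma pvForA_skip (last c x : Char) (cs s : List Char) (count : Int) (h : ¬ c = x) :
    pvOutEq (pvForA last (c :: cs) count (x :: s)) (pvForA last (c :: cs) count s) := by
  cases hin : PySem.Chars.isIn [c] s with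
  | false =>
      have hin' := pv_isIn_cons_ne c x s h
      rw [hin] at hin'
      simp only [pvForA, hin, hin']
      exact ⟨rfl, rfl, by simp⟩
  | true =>
      have hin' := pv_isIn_cons_ne c x s h
      rw [hin] at hin'
      have hk : 0 ≤ PySem.Chars.find s [c] :=
        (PySem.Chars.find_nonneg_iff _ _).mpr ((PySem.Chars.isIn_iff_infix _ _).mp hin)
      have heq : PySem.List.slice (x :: s) (some (PySem.Chars.find (x :: s) [c] + 1)) none
          = PySem.List.slice s (some (PySem.Chars.find s [c] + 1)) none := by
        rw [pv_find_cons_ne c x s h hin]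
        rw [PySem.List.slice_from (x :: s) (by omega), PySem.List.slice_from s (by omega)]
        have ht : (PySem.Chars.find s [c] + 1 + 1).toNat = (PySem.Chars.find s [c] + 1).toNat + 1 := by
          omega
        rw [ht, List.drop_succ_cons]
      simp only [pvForA, hin, hin']
      rw [heq]
      exact pvOutEq_refl _

-- A's inner pass equals the pointer scan
lemma pvForA_eq_scan (last : Char) (s : List Char) :
    ∀ (cs : List Char) (count : Int),
      pvOutEq (pvForA last cs count s) (pvScan last cs s count) := by
  induction s with
  | nil =>
      intro cs count
      cases cs with
      | nil =>
          simp only [pvForA, pvScan]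
          exact pvOutEq_refl _
      | cons c cs' =>
          simp only [pvForA, pvScan, pv_isIn_nil]
          exact ⟨rfl, rfl, by simp⟩
  | cons x s' ih =>
      intro cs count
      cases cs with
      | nil =>
          simp only [pvForA, pvScan]
          exact pvOutEq_refl _
      | cons c cs' =>
          by_cases hcx : c = x
          · subst hcx
            have hin := pv_isIn_cons_self c s'
            have hfind := pv_find_cons_self c s'
            have hslice : PySem.List.slice (c :: s') (some (0 + 1)) none = s' := by
              simpa using PySem.List.slice_from_one (c :: s')
            simp only [pvForA, pvScan, hin, hfind, hslice, beq_self_eq_true, if_true,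
              Bool.true_eq_false, if_false]
            exact ih cs' _
          · have hscan : pvScan last (c :: cs') (x :: s') count = pvScan last (c :: cs') s' count := by
              simp only [pvScan]
              simp [hcx]
            rw [hscan]
            exact pvOutEq_trans (pvForA_skip last c x cs' s' count hcx) (ih (c :: cs') count)

-- A's while loop equals the chain of scans
lemma pvWhileA_eq_chainF (codeL : List Char) (last : Char) :
    ∀ (fuel : Nat) (count : Int) (s : List Char),
      pvWhileA codeL last fuel count s = pvChainF codeL last fuel count s := by
  intro fuel
  induction fuel with
  | zero => intro count s; rfl
  | succ f ih =>
      intro count s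
      obtain ⟨e1, e2, e3⟩ := pvForA_eq_scan last s codeL count
      simp only [pvWhileA, pvChainF]
      rcases ha : pvForA last codeL count s with ⟨a1, a2, a3⟩
      rcases hb : pvScan last codeL s count with ⟨b1, b2, b3⟩
      rw [ha, hb] at e1 e2 e3
      simp only at e1 e2 e3
      cases a3 with
      | true =>
          rw [← e2]
          simp only
          rw [e1, e3 rfl, ih]
      | false =>
          rw [← e2]
          simp only
          rw [e1]

lemma pvChainF_eq_chainG (codeL : List Char) (last : Char) (fuel : Nat) (count : Int) (s : List Char) :
    pvChainF codeL last fuel count s = pvChainG codeL last fuel count codeL s := by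
  cases fuel <;> rfl

lemma pvChainG_congr (codeL : List Char) (last : Char) (f : Nat)
    {count1 count2 : Int} {rest1 rest2 s1 s2 : List Char}
    (h : pvScan last rest1 s1 count1 = pvScan last rest2 s2 count2) :
    pvChainG codeL last (f + 1) count1 rest1 s1 = pvChainG codeL last (f + 1) count2 rest2 s2 := by
  simp only [pvChainG, h]

-- proof-side: B's scan with the pending part of code materialised as a suffix list
def pvLoopRest (codeL : List Char) (last : Char) : List Char → Int → List Char → Nat → Int
  | [], count, _, _ => count
  | ch :: ms, count, rest, passes =>
      if passes == 100 then count
      else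
        match rest with
        | [] => pvLoopRest codeL last ms count [] passes
        | r :: rs =>
          if ch == r then
            let count' := if r == last then count + 1 else count
            match rs with
            | [] => pvLoopRest codeL last ms count' codeL (passes + 1)
            | _ :: _ => pvLoopRest codeL last ms count' rs passes
          else pvLoopRest codeL last ms count (r :: rs) passes

-- the index pointer of pvLoopB tracks the suffix codeL.drop j
lemma pvLoopB_eq_loopRest (codeL : List Char) (last : Char) :
    ∀ (ms : List Char) (count : Int) (j passes : Nat), j < codeL.length →
      pvLoopB codeL last ms count j passes
        = pvLoopRest codeL last ms count (codeL.drop j) passes := by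
  intro ms
  induction ms with
  | nil => intro count j passes hj; rfl
  | cons ch ms ih =>
      intro count j passes hj
      have hdrop : codeL.drop j = codeL[j] :: codeL.drop (j + 1) := List.drop_eq_getElem_cons hj
      have hgetD : codeL.getD j ' ' = codeL[j] := List.getD_eq_getElem codeL ' ' hj
      rw [pvLoopB, hgetD, hdrop, pvLoopRest]
      rcases hp : ((passes == 100) : Bool) with _ | _
      · simp only [Bool.false_eq_true, if_false]
        by_cases hch : ch = codeL[j]
        · subst hch
          simp only [beq_self_eq_true, if_true]
          by_cases hlast : j + 1 = codeL.length
          · have hrs : codeL.drop (j + 1) = [] := by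
              rw [hlast]; simp
            have hj1 : ((j + 1 == codeL.length) : Bool) = true := by simp [hlast]
            rw [hj1, hrs]
            simp only [if_true]
            have h0 : codeL.drop 0 = codeL := by simp
            rw [ih _ 0 (passes + 1) (by omega), h0]
          · have hj1 : ((j + 1 == codeL.length) : Bool) = false := by simp [hlast]
            have hlt : j + 1 < codeL.length := by omega
            have hrs : codeL.drop (j + 1) ≠ [] := by
              simp only [ne_eq, List.drop_eq_nil_iff]
              omega
            rw [hj1]
            simp only [Bool.false_eq_true, if_false]
            rcases hd : codeL.drop (j + 1) with _ | ⟨r2, rs2⟩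
            · exact absurd hd hrs
            · rw [ih _ (j + 1) passes hlt, hd]
        · have hb : ((ch == codeL[j]) : Bool) = false := by simp [hch]
          rw [hb]
          simp only [Bool.false_eq_true, if_false]
          rw [ih _ j passes hj, hdrop]
      · simp
        
-- B's single scan equals the chain of scans, for any mid-pass state
lemma pvLoopRest_eq_chainG (codeL : List Char) (last : Char) (hcode : codeL ≠ []) :
    ∀ (s : List Char) (count : Int) (rest : List Char) (fuel : Nat),
      fuel ≤ 100 → rest ≠ [] →
      pvLoopRest codeL last s count rest (100 - fuel) = pvChainG codeL last fuel count rest s := by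
  intro s
  induction s with
  | nil =>
      intro count rest fuel hfuel hrest
      cases fuel with
      | zero => rfl
      | succ f =>
          cases rest with
          | nil => exact absurd rfl hrest
          | cons r rs =>
              simp only [pvLoopRest, pvChainG, pvScan]
  | cons x s' ih =>
      intro count rest fuel hfuel hrest
      cases fuel with
      | zero => rfl
      | succ f =>
          have hne : ((100 - (f + 1) : Nat) == 100) = false := by
            simp only [beq_eq_false_iff_ne, ne_eq]
            omega
          cases rest with
          | nil => exact absurd rfl hrest
          | cons r rs =>
              rw [pvLoopRest]
              simp only [hne, Bool.false_eq_true, if_false]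
              by_cases hxr : x = r
              · subst hxr
                simp only [beq_self_eq_true, if_true]
                cases rs with
                | nil =>
                    have hstep : (100 - (f + 1) : Nat) + 1 = 100 - f := by omega
                    rw [hstep, ih _ codeL f (by omega) hcode]
                    simp only [pvChainG, pvScan, beq_self_eq_true, if_true]
                    exact (pvChainF_eq_chainG codeL last f _ s').symm
                | cons r2 rs2 =>
                    rw [ih _ (r2 :: rs2) (f + 1) hfuel (by simp)]
                    refine (pvChainG_congr codeL last f ?_).symm
                    simp only [pvScan]
                    simp
              · have hbeq : (x == r) = false := by simp [hxr]
                simp only [hbeq, Bool.false_eq_true, if_false]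
                rw [ih _ (r :: rs) (f + 1) hfuel hrest]
                refine (pvChainG_congr codeL last f ?_).symm
                have hrx : ¬ r = x := fun hh => hxr hh.symm
                simp only [pvScan]
                simp [hrx]

lemma pv_toList_ne_nil {code : String} (h : code ≠ "") : code.toList ≠ [] := by
  intro hnil
  exact h (String.toList_inj.mp (by simpa using hnil))

lemma pv_last_eq (code : String) (h : code.toList ≠ []) :
    PySem.Str.pyGet? code ((PySem.Str.len code : Int) - 1) = some (code.toList.getLast h) ∧
    PySem.Str.pyGet? code (-1) = some (code.toList.getLast h) := by
  have hlen : 0 < code.toList.length := List.length_pos_iff.mpr h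
  constructor
  · have hcast : ((PySem.Str.len code : Int) - 1) = ((code.toList.length - 1 : Nat) : Int) := by
      simp only [PySem.Str.len_eq]
      omega
    rw [hcast]
    simp only [PySem.Str.pyGet?_natCast]
    rw [List.getElem?_eq_getElem (by omega : code.toList.length - 1 < code.toList.length)]
    exact congrArg some (List.getLast_eq_getElem h).symm
  · have : PySem.Str.pyGet? code (-1) = PySem.List.pyGet? code.toList (-1) := by
      simp [PySem.Str.pyGet?]
    rw [this, PySem.List.pyGet?_neg_one, List.getLast?_eq_getLast_of_ne_nil h]

-- ===== VERDICT (by name: the statement is the Claim_ definition above) =====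
theorem breakout_room_spec : Claim_equal_breakout_room := by
  intro code message _hdom hpre
  unfold Spec_breakout_room breakout_room breakout_room_alt
  have hne : code.toList ≠ [] := pv_toList_ne_nil hpre
  obtain ⟨h1, h2⟩ := pv_last_eq code hne
  rw [h1, h2]
  show pvWhileA code.toList (code.toList.getLast hne) 100 0 message.toList
      = pvLoopB code.toList (code.toList.getLast hne) message.toList 0 0 0
  rw [pvWhileA_eq_chainF, pvChainF_eq_chainG]
  rw [pvLoopB_eq_loopRest code.toList (code.toList.getLast hne) message.toList 0 0 0
    (List.length_pos_iff.mpr hne)]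
  have h3 := pvLoopRest_eq_chainG code.toList (code.toList.getLast hne) hne message.toList 0
    code.toList 100 (by omega) hne
  norm_num at h3
  rw [List.drop_zero]
  exact h3.symm
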